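-- pv_equiv track=rewrite | github.com/captainpragmatic/PRAHO | services/platform/apps/customers/tasks.py | _detect_feedback_category
-- ===== SOURCE A (Python) =====
-- _FEEDBACK_CATEGORIES: dict[str, list[str]] = {
--     "billing": ["invoice", "payment", "charge", "refund", "price", "factura", "plata", "pret", "taxa"],
--     "technical": ["server", "down", "error", "slow", "dns", "ssl", "email", "hosting", "eroare", "lent"],
--     "praise": ["great", "excellent", "thank", "awesome", "happy", "multumesc", "excelent", "bravo"],
--     "complaint": ["bad", "terrible", "worst", "angry", "disappointed", "nemultumit", "prost", "rau"],
--     "feature_request": ["wish", "would be nice", "suggest", "feature", "add", "implement", "doresc", "propun"],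
-- }
--
-- def _detect_feedback_category(content: str) -> str:
--     """Detect feedback category from note content using keyword matching."""
--     content_lower = content.lower()
--     words = {w.strip(".,!?;:'\"()[]{}") for w in content_lower.split()}
--     scores: dict[str, int] = {}
--     for category, keywords in _FEEDBACK_CATEGORIES.items():
--         score = 0
--         for kw in keywords:
--             if " " in kw:  # Multi-word phrases: substring match (e.g., "would be nice")
--                 score += 1 if kw in content_lower else 0
--             else:  # Single words: word-boundary match
--                 score += 1 if kw in words else 0
--         if score > 0:
--             scores[category] = score
--     if not scores:
--         return "general"
--     return max(scores, key=lambda k: scores[k])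
-- ===== SOURCE B (Python) =====
-- _FEEDBACK_CATEGORIES: dict[str, list[str]] = {
--     "billing": ["invoice", "payment", "charge", "refund", "price", "factura", "plata", "pret", "taxa"],
--     "technical": ["server", "down", "error", "slow", "dns", "ssl", "email", "hosting", "eroare", "lent"],
--     "praise": ["great", "excellent", "thank", "awesome", "happy", "multumesc", "excelent", "bravo"],
--     "complaint": ["bad", "terrible", "worst", "angry", "disappointed", "nemultumit", "prost", "rau"],
--     "feature_request": ["wish", "would be nice", "suggest", "feature", "add", "implement", "doresc", "propun"],
-- }
--
-- # Inverted index: single-word keyword -> category; multi-word phrases kept separately.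
-- _INDEX: dict[str, str] = {}
-- _PHRASES: list[tuple[str, str]] = []
-- for _cat, _kws in _FEEDBACK_CATEGORIES.items():
--     for _kw in _kws:
--         if " " in _kw:
--             _PHRASES.append((_kw, _cat))
--         else:
--             _INDEX[_kw] = _cat
--
--
-- def _detect_feedback_category(content: str) -> str:
--     """Detect feedback category via one pass over the word-set using an inverted index."""
--     content_lower = content.lower()
--     words = {w.strip(".,!?;:'\"()[]{}") for w in content_lower.split()}
--     scores = {cat: 0 for cat in _FEEDBACK_CATEGORIES}
--     for w in words:
--         cat = _INDEX.get(w)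
--         if cat is not None:
--             scores[cat] += 1
--     for phrase, cat in _PHRASES:
--         if phrase in content_lower:
--             scores[cat] += 1
--     best = max(scores, key=lambda k: scores[k])
--     return best if scores[best] > 0 else "general"
-- ===== Notes on version B (the rewrite author's own statement) =====
-- stated objective: alternative
-- what changed: Replaces A's category-by-category scan over every keyword list (building a dict of only-positive scores and taking max over it) with an inverted index keyword->category built once, a single pass over the word-set incrementing per-category counters, a separate substring check for the one multi-word phrase, and a final argmax over all categories guarded by positivity.
import Mathlib
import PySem

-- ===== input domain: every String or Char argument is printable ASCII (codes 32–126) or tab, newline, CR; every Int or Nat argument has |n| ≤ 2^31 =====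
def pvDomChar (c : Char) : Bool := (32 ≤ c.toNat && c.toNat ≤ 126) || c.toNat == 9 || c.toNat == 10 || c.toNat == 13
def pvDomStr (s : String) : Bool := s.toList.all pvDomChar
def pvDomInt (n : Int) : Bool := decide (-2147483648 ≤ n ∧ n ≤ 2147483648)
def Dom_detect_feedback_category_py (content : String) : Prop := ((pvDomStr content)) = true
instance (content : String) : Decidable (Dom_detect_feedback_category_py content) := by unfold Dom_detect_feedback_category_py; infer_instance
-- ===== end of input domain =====

-- B replaces A's per-category scan over all keyword lists with an inverted index
-- (keyword → category) consulted once per word of the word-set; objective: alternative.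

def pvCategories : List (String × List String) := [
  ("billing", ["invoice", "payment", "charge", "refund", "price", "factura", "plata", "pret", "taxa"]),
  ("technical", ["server", "down", "error", "slow", "dns", "ssl", "email", "hosting", "eroare", "lent"]),
  ("praise", ["great", "excellent", "thank", "awesome", "happy", "multumesc", "excelent", "bravo"]),
  ("complaint", ["bad", "terrible", "worst", "angry", "disappointed", "nemultumit", "prost", "rau"]),
  ("feature_request", ["wish", "would be nice", "suggest", "feature", "add", "implement", "doresc", "propun"])]

-- ===== PORT A =====
def detect_feedback_category_py (content : String) : String :=
  let content_lower := PySem.Str.lower content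
  let words : PySem.Set String := PySem.Set.ofList
    ((PySem.Str.split₀ content_lower).map (fun w => PySem.Str.stripChars w ".,!?;:'\"()[]{}"))
  let scores : PySem.Dict String Int := pvCategories.foldl (fun scores ckws =>
      let score : Int := ckws.2.foldl (fun score kw =>
        if PySem.Str.isIn " " kw then score + (if PySem.Str.isIn kw content_lower then 1 else 0)
        else score + (if PySem.Set.contains words kw then 1 else 0)) 0
      if score > 0 then scores.insert ckws.1 score else scores) PySem.Dict.empty
  if scores.items = [] then "general"
  else (PySem.List.max? scores.keys (fun k => scores.getD k 0)).getD "general"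

-- ===== PORT B =====
-- module-level loop of Source B: inverted index for single-word keywords, phrase list for the rest
def pvIndex : PySem.Dict String String :=
  pvCategories.foldl (fun d ckws => ckws.2.foldl (fun d kw =>
    if PySem.Str.isIn " " kw then d else d.insert kw ckws.1) d) PySem.Dict.empty

def pvPhrases : List (String × String) :=
  pvCategories.foldl (fun ps ckws => ckws.2.foldl (fun ps kw =>
    if PySem.Str.isIn " " kw then ps ++ [(kw, ckws.1)] else ps) ps) []

def detect_feedback_category_py_alt (content : String) : String :=
  let content_lower := PySem.Str.lower content
  let words : PySem.Set String := PySem.Set.ofList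
    ((PySem.Str.split₀ content_lower).map (fun w => PySem.Str.stripChars w ".,!?;:'\"()[]{}"))
  let scores0 : PySem.Dict String Int := pvCategories.foldl (fun d ckws => d.insert ckws.1 0) PySem.Dict.empty
  let scores1 : PySem.Dict String Int := words.foldl (fun d w =>
      (pvIndex.get? w).elim d (fun cat => d.modify cat 0 (· + 1))) scores0
  let scores : PySem.Dict String Int := pvPhrases.foldl (fun d pc =>
      if PySem.Str.isIn pc.1 content_lower then d.modify pc.2 0 (· + 1) else d) scores1
  (PySem.List.max? scores.keys (fun k => scores.getD k 0)).elim "general"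
    (fun best => if scores.getD best 0 > 0 then best else "general")

-- ===== PRECONDITION & SPEC =====
def Spec_detect_feedback_category_py (content : String) (out : String) : Prop := out = detect_feedback_category_py_alt content
instance (content : String) (out : String) : Decidable (Spec_detect_feedback_category_py content out) := by unfold Spec_detect_feedback_category_py; infer_instance

-- ===== CLAIM (what is proved, stated in full; the proofs are below) =====
def Claim_equal_detect_feedback_category_py : Prop := ∀ (content : String), Dom_detect_feedback_category_py content → Spec_detect_feedback_category_py content (detect_feedback_category_py content)

-- ===== LEMMAS AND PROOFS =====

def pvCatNames : List String := ["billing", "technical", "praise", "complaint", "feature_request"]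

def pvScore (cl : String) (W : List String) (c : String) : Int :=
  ((W.filterMap (fun w => pvIndex.get? w)).count c : Int) +
  (if c = "feature_request" ∧ PySem.Str.isIn "would be nice" cl = true then 1 else 0)

theorem pv_score_nonneg (cl : String) (W : List String) (c : String) : 0 ≤ pvScore cl W c := by
  unfold pvScore; split_ifs <;> positivity

theorem pv_foldl_match (l : List String) (g : String → Option String)
    (h : PySem.Dict String Int → String → PySem.Dict String Int) (d : PySem.Dict String Int) :
    l.foldl (fun d w => (g w).elim d (fun c => h d c)) d = (l.filterMap g).foldl h d := by
  induction l generalizing d with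
  | nil => rfl
  | cons w l ih => cases hg : g w <;> simp [hg, ih]

theorem pv_update_self (s : PySem.Set String) (l : List String) (h : ∀ x ∈ l, x ∈ s) :
    PySem.Set.update s l = s := by
  induction l generalizing s with
  | nil => rfl
  | cons x l ih =>
    have hx : PySem.Set.add s x = s := by
      simp [PySem.Set.add, PySem.Set.contains, List.contains_eq_mem, h x (by simp)]
    simp only [PySem.Set.update, List.foldl_cons]
    rw [show List.foldl PySem.Set.add (PySem.Set.add s x) l = PySem.Set.update (PySem.Set.add s x) l from rfl,
        hx, ih s (fun y hy => h y (by simp [hy]))]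

theorem pv_countP_mem_comm (l₁ l₂ : List String) (h₁ : l₁.Nodup) (h₂ : l₂.Nodup) :
    l₁.countP (fun a => decide (a ∈ l₂)) = l₂.countP (fun a => decide (a ∈ l₁)) := by
  rw [List.countP_eq_length_filter, List.countP_eq_length_filter,
      ← List.toFinset_card_of_nodup (h₁.filter _), ← List.toFinset_card_of_nodup (h₂.filter _)]
  congr 1
  ext a
  simp
  tauto

def pvMaxStep (k : String → Int) (acc : Option String) (x : String) : Option String :=
  match acc with
  | none => some x
  | some m => if k m < k x then some x else some m

theorem pvMaxStep_none (k : String → Int) (x : String) : pvMaxStep k none x = some x := rfl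

theorem pvMaxStep_some (k : String → Int) (m x : String) :
    pvMaxStep k (some m) x = if k m < k x then some x else some m := rfl

theorem pv_max?_eq_foldl (l : List String) (k : String → Int) :
    PySem.List.max? l k = l.foldl (pvMaxStep k) none := by
  unfold PySem.List.max?
  exact PySem.List.foldl_congr_mem _ _ _ _ (fun acc x _ => by cases acc <;> rfl)

theorem pv_max?_congr (l : List String) (k1 k2 : String → Int) (h : ∀ x ∈ l, k1 x = k2 x) :
    PySem.List.max? l k1 = PySem.List.max? l k2 := by
  rw [pv_max?_eq_foldl, pv_max?_eq_foldl]
  suffices H : ∀ (acc : Option String), (∀ m, acc = some m → k1 m = k2 m) →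
      l.foldl (pvMaxStep k1) acc = l.foldl (pvMaxStep k2) acc by
    exact H none (by simp)
  induction l with
  | nil => intro acc _; rfl
  | cons x l ih =>
    intro acc hacc
    have hx := h x (by simp)
    have h' : ∀ y ∈ l, k1 y = k2 y := fun y hy => h y (by simp [hy])
    simp only [List.foldl_cons]
    cases acc with
    | none =>
      rw [pvMaxStep_none, pvMaxStep_none]
      exact ih h' (some x) (by intro n hn; cases hn; exact hx)
    | some m =>
      have hm := hacc m rfl
      rw [pvMaxStep_some, pvMaxStep_some, hm, hx]
      exact ih h' _ (by
        intro n hn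
        by_cases hlt : k2 m < k2 x <;> simp [hlt] at hn <;> cases hn
        · exact hx
        · exact hm)

theorem pv_max?_filter (cats : List String) (s : String → Int) (h0 : ∀ c ∈ cats, 0 ≤ s c) :
    PySem.List.max? (cats.filter (fun c => decide (0 < s c))) s
      = (PySem.List.max? cats s).bind (fun b => if 0 < s b then some b else none) := by
  rw [pv_max?_eq_foldl, pv_max?_eq_foldl]
  suffices H : ∀ (acc : Option String), (∀ m, acc = some m → 0 ≤ s m) →
      (cats.filter (fun c => decide (0 < s c))).foldl (pvMaxStep s) (acc.bind (fun b => if 0 < s b then some b else none))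
      = (cats.foldl (pvMaxStep s) acc).bind (fun b => if 0 < s b then some b else none) by
    simpa using H none (by simp)
  induction cats with
  | nil => intro acc _; rfl
  | cons x l ih =>
    intro acc hacc
    have hx : 0 ≤ s x := h0 x (by simp)
    have h0' : ∀ c ∈ l, 0 ≤ s c := fun c hc => h0 c (by simp [hc])
    have ih' := fun acc hacc => ih h0' acc hacc
    by_cases hxp : 0 < s x
    · rw [List.filter_cons_of_pos (by simpa using hxp)]
      simp only [List.foldl_cons]
      cases acc with
      | none =>
        have H := ih' (some x) (by intro m hm; cases hm; exact hx)
        simp only [Option.bind_none, Option.bind_some, if_pos hxp] at H ⊢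
        simpa [pvMaxStep_none] using H
      | some m =>
        have hm : 0 ≤ s m := hacc m rfl
        by_cases hmp : 0 < s m
        · have hinv : ∀ n, pvMaxStep s (some m) x = some n → 0 ≤ s n := by
            intro n hn
            rw [pvMaxStep_some] at hn
            by_cases hlt : s m < s x <;> simp [hlt] at hn <;> cases hn
            · exact hx
            · exact hm
          have H := ih' (pvMaxStep s (some m) x) hinv
          have hb : (pvMaxStep s (some m) x).bind (fun b => if 0 < s b then some b else none)
              = pvMaxStep s (some m) x := by
            rw [pvMaxStep_some]
            by_cases hlt : s m < s x <;> simp [hlt, hxp, hmp]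
          rw [hb] at H
          simp only [Option.bind_some, if_pos hmp]
          exact H
        · have hm0 : s m = 0 := le_antisymm (by omega) hm
          have H := ih' (some x) (by intro n hn; cases hn; exact hx)
          simp only [Option.bind_some, if_pos hxp] at H
          simp only [Option.bind_some, if_neg hmp]
          rw [pvMaxStep_none] at *
          rw [show pvMaxStep s (some m) x = some x by rw [pvMaxStep_some]; simp; omega]
          exact H
    · have hx0 : s x = 0 := le_antisymm (by omega) hx
      rw [List.filter_cons_of_neg (by simpa using hxp)]
      simp only [List.foldl_cons]
      cases acc with
      | none =>
        have H := ih' (some x) (by intro n hn; cases hn; exact hx)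
        simp only [Option.bind_some, if_neg hxp, Option.bind_none] at H ⊢
        rw [pvMaxStep_none]
        exact H
      | some m =>
        have hm : 0 ≤ s m := hacc m rfl
        rw [show pvMaxStep s (some m) x = some m by rw [pvMaxStep_some]; simp; omega]
        exact ih' (some m) (by intro n hn; cases hn; exact hm)

theorem pv_itemsA (cl : String) (W : PySem.Set String) :
    ∀ (cats : List (String × List String)) (d : PySem.Dict String Int),
    (∀ x ∈ cats, d.contains x.1 = false) → (cats.map Prod.fst).Nodup →
    (cats.foldl (fun scores ckws =>
        if (ckws.2.foldl (fun score kw =>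
          if PySem.Str.isIn " " kw then score + (if PySem.Str.isIn kw cl then 1 else 0)
          else score + (if PySem.Set.contains W kw then 1 else 0)) 0 : Int) > 0
        then scores.insert ckws.1 (ckws.2.foldl (fun score kw =>
          if PySem.Str.isIn " " kw then score + (if PySem.Str.isIn kw cl then 1 else 0)
          else score + (if PySem.Set.contains W kw then 1 else 0)) 0)
        else scores) d).items
      = d.items ++ (cats.filter (fun ckws => decide ((ckws.2.foldl (fun score kw =>
          if PySem.Str.isIn " " kw then score + (if PySem.Str.isIn kw cl then 1 else 0)
          else score + (if PySem.Set.contains W kw then 1 else 0)) 0 : Int) > 0))).map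
          (fun ckws => (ckws.1, (ckws.2.foldl (fun score kw =>
          if PySem.Str.isIn " " kw then score + (if PySem.Str.isIn kw cl then 1 else 0)
          else score + (if PySem.Set.contains W kw then 1 else 0)) 0 : Int))) := by
  intro cats
  induction cats with
  | nil => intro d _ _; simp
  | cons x cats ih =>
    intro d hfresh hnd
    simp only [List.foldl_cons]
    by_cases hx : (x.2.foldl (fun score kw =>
        if PySem.Str.isIn " " kw then score + (if PySem.Str.isIn kw cl then 1 else 0)
        else score + (if PySem.Set.contains W kw then 1 else 0)) 0 : Int) > 0
    · rw [if_pos hx]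
      rw [ih _ (by
          intro y hy
          rw [PySem.Dict.contains_insert]
          have hne : y.1 ≠ x.1 := by
            intro he
            have := hnd
            simp only [List.map_cons, List.nodup_cons] at this
            exact this.1 (he ▸ List.mem_map_of_mem hy)
          simp [hne, hfresh y (by simp [hy])])
        (by simpa using hnd.of_cons)]
      rw [PySem.Dict.items_insert_of_not_contains _ _ (hfresh x (by simp))]
      rw [List.filter_cons_of_pos (by simpa using hx)]
      simp
    · rw [if_neg hx, ih _ (fun y hy => hfresh y (by simp [hy])) (by simpa using hnd.of_cons)]
      rw [List.filter_cons_of_neg (by simpa using hx)]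

def pvItemsL : List (String × String) := [("invoice", "billing"), ("payment", "billing"),
  ("charge", "billing"), ("refund", "billing"), ("price", "billing"),
  ("factura", "billing"), ("plata", "billing"), ("pret", "billing"), ("taxa", "billing"), ("server", "technical"),
  ("down", "technical"), ("error", "technical"), ("slow", "technical"), ("dns", "technical"), ("ssl", "technical"),
  ("email", "technical"), ("hosting", "technical"), ("eroare", "technical"), ("lent", "technical"), ("great", "praise"),
  ("excellent", "praise"), ("thank", "praise"), ("awesome", "praise"), ("happy", "praise"), ("multumesc", "praise"),
  ("excelent", "praise"), ("bravo", "praise"), ("bad", "complaint"), ("terrible", "complaint"), ("worst", "complaint"),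
  ("angry", "complaint"), ("disappointed", "complaint"), ("nemultumit", "complaint"), ("prost", "complaint"),
  ("rau", "complaint"), ("wish", "feature_request"), ("suggest", "feature_request"), ("feature", "feature_request"),
  ("add", "feature_request"), ("implement", "feature_request"), ("doresc", "feature_request"),
  ("propun", "feature_request")]

set_option maxRecDepth 40000 in
theorem pv_items_eq : pvIndex.items = pvItemsL := rfl

set_option maxRecDepth 40000 in
theorem pv_get?_iff (w c : String) : pvIndex.get? w = some c ↔ (w, c) ∈ pvIndex.items :=
  PySem.Dict.get?_eq_some_iff_mem_items _ _ _ (by decide)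

def pvSingles (c : String) : List String := (pvItemsL.filter (fun p => p.2 == c)).map Prod.fst

theorem pv_lookup_iff (c : String) (hc : c ∈ pvCatNames) (w : String) :
    (pvIndex.get? w = some c) ↔ w ∈ pvSingles c := by
  rw [pv_get?_iff, pv_items_eq]
  fin_cases hc <;> simp [pvItemsL, pvSingles, Prod.mk.injEq]

theorem pv_count_filterMap (W : List String) (c : String) (hc : c ∈ pvCatNames) :
    (W.filterMap (fun w => pvIndex.get? w)).count c
      = W.countP (fun w => decide (w ∈ pvSingles c)) := by
  rw [List.count, List.countP_filterMap]
  refine List.countP_congr ?_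
  intro w _
  constructor
  · intro h
    cases hg : pvIndex.get? w with
    | none => rw [hg] at h; simp at h
    | some c' =>
      rw [hg] at h
      simp at h
      simpa using (pv_lookup_iff c hc w).mp (by rw [hg, h])
  · intro h
    simp at h
    rw [(pv_lookup_iff c hc w).mpr (by simpa using h)]
    simp

theorem pv_singles_countP (W : PySem.Set String) (hW : W.Nodup)
    (c : String) (hc : c ∈ pvCatNames) :
    ((W.filterMap (fun w => pvIndex.get? w)).count c : Int)
      = ((pvSingles c).countP (fun kw => PySem.Set.contains W kw) : Int) := by
  rw [pv_count_filterMap W c hc,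
      pv_countP_mem_comm W (pvSingles c) hW (by fin_cases hc <;> decide)]
  congr 1
  refine List.countP_congr ?_
  intro kw _
  simp [PySem.Set.contains, List.contains_eq_mem]

theorem pv_scoreA_full (W : PySem.Set String) (cl : String) (ks : List String) : ∀ a : Int,
    ks.foldl (fun score kw =>
      if PySem.Str.isIn " " kw then score + (if PySem.Str.isIn kw cl then 1 else 0)
      else score + (if PySem.Set.contains W kw then 1 else 0)) a
    = a + ((ks.filter (fun kw => !PySem.Str.isIn " " kw)).countP (fun kw => PySem.Set.contains W kw) : Int)
        + ((ks.filter (fun kw => PySem.Str.isIn " " kw)).countP (fun kw => PySem.Str.isIn kw cl) : Int) := by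
  induction ks with
  | nil => intro a; simp
  | cons kw ks ih =>
    intro a
    simp only [List.foldl_cons]
    by_cases hsp : PySem.Str.isIn " " kw = true
    · rw [List.filter_cons_of_neg (by rw [Bool.not_eq_true, hsp]; simp),
          List.filter_cons_of_pos (p := fun kw => PySem.Str.isIn " " kw) hsp, if_pos hsp, List.countP_cons, ih]
      split_ifs with hin <;> push_cast <;> omega
    · have hf : PySem.Str.isIn " " kw = false := by
        revert hsp; cases PySem.Str.isIn " " kw <;> simp
      rw [List.filter_cons_of_pos (by rw [Bool.not_eq_true', hf]),
          List.filter_cons_of_neg (by rw [hf]; simp),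
          if_neg hsp, List.countP_cons, ih]
      split_ifs with hin <;> push_cast <;> omega

set_option maxRecDepth 40000 in
theorem pv_scoreA_eq (cl : String) (W : PySem.Set String) (hW : W.Nodup) :
    ∀ x ∈ pvCategories,
    (x.2.foldl (fun score kw =>
      if PySem.Str.isIn " " kw then score + (if PySem.Str.isIn kw cl then 1 else 0)
      else score + (if PySem.Set.contains W kw then 1 else 0)) 0 : Int) = pvScore cl W x.1 := by
  intro x hx
  rw [pv_scoreA_full W cl x.2 0]
  unfold pvScore
  fin_cases hx
  · rw [show (["invoice", "payment", "charge", "refund", "price", "factura", "plata", "pret", "taxa"].filter (fun kw => !PySem.Str.isIn " " kw)) = pvSingles "billing" from by decide,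
        show (["invoice", "payment", "charge", "refund", "price", "factura", "plata", "pret", "taxa"].filter (fun kw => PySem.Str.isIn " " kw)) = [] from by decide,
        pv_singles_countP W hW "billing" (by decide)]
    simp
  · rw [show (["server", "down", "error", "slow", "dns", "ssl", "email", "hosting", "eroare", "lent"].filter (fun kw => !PySem.Str.isIn " " kw)) = pvSingles "technical" from by decide,
        show (["server", "down", "error", "slow", "dns", "ssl", "email", "hosting", "eroare", "lent"].filter (fun kw => PySem.Str.isIn " " kw)) = [] from by decide,
        pv_singles_countP W hW "technical" (by decide)]
    simp
  · rw [show (["great", "excellent", "thank", "awesome", "happy", "multumesc", "excelent", "bravo"].filter (fun kw => !PySem.Str.isIn " " kw)) = pvSingles "praise" from by decide,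
        show (["great", "excellent", "thank", "awesome", "happy", "multumesc", "excelent", "bravo"].filter (fun kw => PySem.Str.isIn " " kw)) = [] from by decide,
        pv_singles_countP W hW "praise" (by decide)]
    simp
  · rw [show (["bad", "terrible", "worst", "angry", "disappointed", "nemultumit", "prost", "rau"].filter (fun kw => !PySem.Str.isIn " " kw)) = pvSingles "complaint" from by decide,
        show (["bad", "terrible", "worst", "angry", "disappointed", "nemultumit", "prost", "rau"].filter (fun kw => PySem.Str.isIn " " kw)) = [] from by decide,
        pv_singles_countP W hW "complaint" (by decide)]
    simp
  · rw [show (["wish", "would be nice", "suggest", "feature", "add", "implement", "doresc", "propun"].filter (fun kw => !PySem.Str.isIn " " kw)) = pvSingles "feature_request" from by decide,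
        show (["wish", "would be nice", "suggest", "feature", "add", "implement", "doresc", "propun"].filter (fun kw => PySem.Str.isIn " " kw)) = ["would be nice"] from by decide,
        pv_singles_countP W hW "feature_request" (by decide)]
    simp only [List.countP_cons, List.countP_nil]
    by_cases hin : PySem.Str.isIn "would be nice" cl = true
    · rw [if_pos hin, if_pos ⟨trivial, hin⟩]
      push_cast
      ring
    · rw [if_neg hin, if_neg (fun h => hin h.2)]
      push_cast
      ring

def pvScores0 : PySem.Dict String Int := pvCategories.foldl (fun d ckws => d.insert ckws.1 0) PySem.Dict.empty

theorem pv_scores0_keys : pvScores0.keys = pvCatNames := by decide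

theorem pv_scores0_getD (c : String) : pvScores0.getD c 0 = 0 := by
  rw [show pvScores0 = PySem.Dict.mk [("billing", 0), ("technical", 0), ("praise", 0), ("complaint", 0), ("feature_request", 0)] from rfl]
  simp [PySem.Dict.getD_eq_get?_getD, PySem.Dict.get?_mk_cons]
  split_ifs <;> rfl

set_option maxRecDepth 40000 in
theorem pv_values_sub : ∀ v ∈ pvIndex.values, v ∈ pvCatNames := by decide

set_option maxRecDepth 40000 in
theorem pv_phrases_eq : pvPhrases = [("would be nice", "feature_request")] := rfl

theorem pv_names_surj : ∀ c ∈ pvCatNames, ∃ x ∈ pvCategories, x.1 = c := by decide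

set_option maxRecDepth 40000 in
theorem pv_main (content : String) :
    detect_feedback_category_py content = detect_feedback_category_py_alt content := by
  unfold detect_feedback_category_py detect_feedback_category_py_alt
  simp only []
  set cl := PySem.Str.lower content with hcl
  set W : PySem.Set String := PySem.Set.ofList
    ((PySem.Str.split₀ cl).map (fun w => PySem.Str.stripChars w ".,!?;:'\"()[]{}")) with hWdef
  have hW : List.Nodup W := PySem.Set.nodup_ofList _
  set s := pvScore cl W with hs
  have hFs := pv_scoreA_eq cl W hW
  -- A side
  set dA : PySem.Dict String Int := pvCategories.foldl (fun scores ckws =>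
        if (ckws.2.foldl (fun score kw =>
          if PySem.Str.isIn " " kw then score + (if PySem.Str.isIn kw cl then 1 else 0)
          else score + (if PySem.Set.contains W kw then 1 else 0)) 0 : Int) > 0
        then scores.insert ckws.1 (ckws.2.foldl (fun score kw =>
          if PySem.Str.isIn " " kw then score + (if PySem.Str.isIn kw cl then 1 else 0)
          else score + (if PySem.Set.contains W kw then 1 else 0)) 0)
        else scores) PySem.Dict.empty with hdA
  have hAitems : dA.items = (pvCategories.filter (fun ckws => decide ((ckws.2.foldl (fun score kw =>
          if PySem.Str.isIn " " kw then score + (if PySem.Str.isIn kw cl then 1 else 0)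
          else score + (if PySem.Set.contains W kw then 1 else 0)) 0 : Int) > 0))).map
          (fun ckws => (ckws.1, (ckws.2.foldl (fun score kw =>
          if PySem.Str.isIn " " kw then score + (if PySem.Str.isIn kw cl then 1 else 0)
          else score + (if PySem.Set.contains W kw then 1 else 0)) 0 : Int))) := by
    rw [hdA, pv_itemsA cl W pvCategories PySem.Dict.empty (fun x _ => PySem.Dict.contains_empty _) (by decide)]
    rw [show (PySem.Dict.empty : PySem.Dict String Int).items = [] from rfl, List.nil_append]
  have hfil : (pvCategories.filter (fun ckws => decide ((ckws.2.foldl (fun score kw =>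
          if PySem.Str.isIn " " kw then score + (if PySem.Str.isIn kw cl then 1 else 0)
          else score + (if PySem.Set.contains W kw then 1 else 0)) 0 : Int) > 0)))
      = pvCategories.filter (fun x => decide (0 < s x.1)) := by
    refine List.filter_congr ?_
    intro x hx
    rw [hFs x hx]
  have hkeysA : dA.keys = pvCatNames.filter (fun c => decide (0 < s c)) := by
    show dA.items.map Prod.fst = _
    rw [hAitems, hfil, List.map_map]
    rw [show pvCatNames = pvCategories.map Prod.fst from rfl, List.filter_map]
    rfl
  have hnodA : dA.keys.Nodup := by
    rw [hkeysA]
    exact (by decide : pvCatNames.Nodup).filter _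
  have hgetA : ∀ c ∈ dA.keys, dA.getD c 0 = s c := by
    intro c hc
    rw [hkeysA] at hc
    obtain ⟨hcmem, hcs⟩ := List.mem_filter.mp hc
    obtain ⟨x, hxmem, hxc⟩ := pv_names_surj c hcmem
    refine PySem.Dict.getD_of_mem_items dA ?_ hnodA 0
    rw [hAitems, hfil]
    refine List.mem_map.mpr ⟨x, List.mem_filter.mpr ⟨hxmem, by rw [hxc]; simpa using hcs⟩, ?_⟩
    rw [hFs x hxmem, ← hs, hxc]
  have hkeyCongr : PySem.List.max? dA.keys (fun k => dA.getD k 0)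
      = PySem.List.max? (pvCatNames.filter (fun c => decide (0 < s c))) s := by
    rw [← hkeysA]
    exact pv_max?_congr _ _ _ hgetA
  -- B side
  set s0 : PySem.Dict String Int := pvCategories.foldl (fun d ckws => d.insert ckws.1 0) PySem.Dict.empty with hs0
  have hs0p : s0 = pvScores0 := by rw [hs0]; rfl
  set d1 : PySem.Dict String Int := W.foldl (fun d w =>
      (pvIndex.get? w).elim d (fun cat => d.modify cat 0 (· + 1))) s0 with hd1
  have h1 : d1 = (W.filterMap (fun w => pvIndex.get? w)).foldl (fun d cat => d.modify cat 0 (· + 1)) pvScores0 := by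
    rw [hd1, hs0p]; exact pv_foldl_match W _ _ pvScores0
  have h1getD : ∀ c, d1.getD c 0 = ((W.filterMap (fun w => pvIndex.get? w)).count c : Int) := by
    intro c
    rw [h1, PySem.Dict.getD_foldl_modify_add_one, pv_scores0_getD]
    ring
  have h1keys : d1.keys = pvCatNames := by
    rw [h1, PySem.Dict.keys_foldl_modify _ _ (fun _ _ => (· + 1)), pv_scores0_keys]
    refine pv_update_self _ _ ?_
    intro c hc
    obtain ⟨w, _, hg⟩ := List.mem_filterMap.mp hc
    refine pv_values_sub c ?_
    exact List.mem_map_of_mem (PySem.Dict.mem_items_of_get?_eq_some _ hg)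
  set dB : PySem.Dict String Int := pvPhrases.foldl (fun d pc =>
      if PySem.Str.isIn pc.1 cl then d.modify pc.2 0 (· + 1) else d) d1 with hdB
  have hdB' : dB = if PySem.Str.isIn "would be nice" cl then d1.modify "feature_request" 0 (· + 1) else d1 := by
    rw [hdB, pv_phrases_eq]
    simp only [List.foldl_cons, List.foldl_nil]
  have hcont1 : d1.contains "feature_request" = true := by
    rw [PySem.Dict.contains_iff_mem_keys, h1keys]; decide
  have hBkeys : dB.keys = pvCatNames := by
    rw [hdB']
    by_cases hin : PySem.Str.isIn "would be nice" cl = true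
    · rw [if_pos hin, PySem.Dict.keys_modify, PySem.Dict.keys_insert_of_contains _ _ hcont1, h1keys]
    · rw [if_neg hin, h1keys]
  have hBgetD : ∀ c, dB.getD c 0 = s c := by
    intro c
    rw [hdB', hs]
    unfold pvScore
    by_cases hin : PySem.Str.isIn "would be nice" cl = true
    · rw [if_pos hin, PySem.Dict.getD_modify]
      by_cases hc : c = "feature_request"
      · rw [if_pos hc, h1getD, hc, if_pos ⟨rfl, hin⟩]
      · rw [if_neg hc, h1getD, if_neg (fun h => hc h.1)]
        ring
    · rw [if_neg hin, h1getD, if_neg (fun h => hin h.2)]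
      ring
  have hBkeyCongr : PySem.List.max? dB.keys (fun k => dB.getD k 0) = PySem.List.max? pvCatNames s := by
    rw [hBkeys]
    exact pv_max?_congr _ _ _ (fun c _ => hBgetD c)
  -- combine
  obtain ⟨b, hb⟩ : ∃ b, PySem.List.max? pvCatNames s = some b := by
    cases h : PySem.List.max? pvCatNames s with
    | none => exact absurd ((PySem.List.max?_eq_none_iff _ _).mp h) (by decide)
    | some b => exact ⟨b, rfl⟩
  have hmf := pv_max?_filter pvCatNames s (fun c _ => pv_score_nonneg cl W c)
  rw [hb, Option.bind_some] at hmf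
  rw [hBkeyCongr, hb]
  by_cases hpos : 0 < s b
  · rw [if_pos hpos] at hmf
    have hne : ¬ dA.items = [] := by
      intro h
      have hk : pvCatNames.filter (fun c => decide (0 < s c)) = [] := by
        rw [← hkeysA]
        show dA.items.map Prod.fst = []
        rw [h]
        rfl
      rw [hk, show PySem.List.max? ([] : List String) s = none from rfl] at hmf
      simp at hmf
    rw [if_neg hne, hkeyCongr, hmf]
    show b = if dB.getD b 0 > 0 then b else "general"
    rw [hBgetD b, if_pos hpos]
  · rw [if_neg hpos] at hmf
    have hfilnil : pvCatNames.filter (fun c => decide (0 < s c)) = [] :=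
      (PySem.List.max?_eq_none_iff _ _).mp hmf
    have hnil : dA.items = [] := by
      rw [hAitems, hfil, List.map_eq_nil_iff]
      have := hfilnil
      rw [show pvCatNames = pvCategories.map Prod.fst from rfl, List.filter_map] at this
      exact List.map_eq_nil_iff.mp this
    rw [if_pos hnil]
    show "general" = if dB.getD b 0 > 0 then b else "general"
    rw [hBgetD b, if_neg (by simpa using hpos)]

-- ===== VERDICT (by name: the statement is the Claim_ definition above) =====
theorem detect_feedback_category_py_spec : Claim_equal_detect_feedback_category_py := by
  intro content _
  unfold Spec_detect_feedback_category_py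
  exact pv_main content
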